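-- pv_equiv track=rewrite | github.com/netdisco/cumulus-netdisco-demo | provisioning/src/usr/share/snmp/ieee8023_lag_pp.py | get_octetstring
-- ===== SOURCE A (Python) =====
-- def get_octetstring(portlist=None):
--     '''
--     Given a list of port numbers, we create
--     a set of hex characters as a string.  The first octet is a bitmap
--     of ports 1-8, the second octet ports 9-16 and so on with port 1 as the
--     most significant bit.
--     For example, a list of ports [1, 5, 17] gives "88 00 80"
--     or, more obvious in binary 10001000 00000000 1000000 where bits
--     are set to one in positions 1, 5, and 17.
--     '''
--     if portlist is None:
--         portlist = []
--     portbin = [(1 << (i-1)) for i in portlist]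
--     portsum = sum(portbin)
--     # now reverse the binary number, removing the "0b"
--     revbin = bin(portsum)[:1:-1]
--     # we might need to pad to the end with zeros to make a byte
--     padding = (8 - (len(revbin) % 8)) % 8
--     paddedrevbin = '%s%s' % (revbin, padding*'0')
--     # take the padded binary string in chunks of 8 bits and
--     # convert it to a hex
--     # string with spaces between the bytes for an snmp octet string
--     paddedegressports = ' '.join([('%02x' % int(paddedrevbin[i:i+8], 2))
--                                   for i in range(0, len(paddedrevbin), 8)])
--     return paddedegressports
-- ===== SOURCE B (Python) =====
-- def get_octetstring(portlist=None):
--     '''Per-byte arithmetic rewrite: shift/mask each octet out of the port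
--     bitmap and reverse its 8 bits arithmetically, instead of reversing,
--     padding and chunking a whole binary string.'''
--     portsum = sum(1 << (i - 1) for i in (portlist or []))
--     n_bytes = max(1, (portsum.bit_length() + 7) // 8)
--     out = []
--     for k in range(n_bytes):
--         byte = (portsum >> (8 * k)) & 0xff
--         rev = 0
--         for b in range(8):
--             rev = 2 * rev + ((byte >> b) & 1)
--         out.append('%02x' % rev)
--     return ' '.join(out)
-- ===== Notes on version B (the rewrite author's own statement) =====
-- stated objective: alternative
-- what changed: A converts the whole port bitmap to a binary string, reverses it, pads it to a byte multiple and parses 8-character chunks back into ints; B never builds a binary string: it extracts each octet by shift-and-mask arithmetic ((portsum >> 8k) & 0xff), reverses its 8 bits arithmetically, and formats byte by byte.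
import Mathlib
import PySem

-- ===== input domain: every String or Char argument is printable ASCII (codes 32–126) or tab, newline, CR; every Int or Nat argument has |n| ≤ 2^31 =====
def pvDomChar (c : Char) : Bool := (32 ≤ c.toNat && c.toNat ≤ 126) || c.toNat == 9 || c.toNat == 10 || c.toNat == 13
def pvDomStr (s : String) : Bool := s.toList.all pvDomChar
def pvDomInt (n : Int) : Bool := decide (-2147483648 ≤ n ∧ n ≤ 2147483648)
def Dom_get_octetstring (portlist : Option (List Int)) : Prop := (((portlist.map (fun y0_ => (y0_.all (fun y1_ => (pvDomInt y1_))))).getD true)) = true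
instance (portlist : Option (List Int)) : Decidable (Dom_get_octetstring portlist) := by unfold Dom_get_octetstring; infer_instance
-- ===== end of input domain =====

-- B replaces A's binary-string reversal/padding/chunking by per-byte shift-mask-and-bit-reverse
-- arithmetic (objective: alternative decomposition, same cost).

-- ===== PORT A =====
-- '%02x' % n — exact for n < 256, the only values either program formats (a parsed/masked byte)
def pvHexDigitChar (n : Nat) : Char := if n < 10 then Char.ofNat (48 + n) else Char.ofNat (87 + n)
def pvHex2 (n : Nat) : String := String.ofList [pvHexDigitChar (n / 16), pvHexDigitChar (n % 16)]

-- bin(n)[2:] (binary digits, MSB first, no leading zeros; [] for n = 0) by repeated division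
def pvBinChars (n : Nat) (acc : List Char) : List Char :=
  if _h : n = 0 then acc else pvBinChars (n / 2) ((if n % 2 = 1 then '1' else '0') :: acc)
decreasing_by omega

-- bin(n)[2:] including the n = 0 case, where Python's bin gives '0b0'
def pvBin (n : Nat) : List Char := if n = 0 then ['0'] else pvBinChars n []

-- int(s, 2) — exact for nonempty strings of '0'/'1' characters, the only ones A parses
def pvBinVal (cs : List Char) : Nat := cs.foldl (fun a c => 2 * a + (if c = '1' then 1 else 0)) 0

-- the comprehension [hex(int(padded[i:i+8], 2)) for i in range(0, len(padded), 8)]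
-- as the obvious index-stepping recursion; padded[i:i+8] = (drop i).take 8 for 0 ≤ i < len
def pvChunkLoop (l : List Char) (i : Nat) : List String :=
  if i < l.length then pvHex2 (pvBinVal ((l.drop i).take 8)) :: pvChunkLoop l (i + 8) else []
termination_by l.length - i
decreasing_by omega

def get_octetstring (portlist : Option (List Int)) : String :=
  let pl := portlist.getD []
  let portbin := pl.map (fun i => (1 : Nat) <<< (i - 1).toNat)   -- toNat exact: Pre_ gives i ≥ 1
  let portsum := portbin.sum
  let revbin := (pvBin portsum).reverse                          -- bin(portsum)[:1:-1]
  let padding := (8 - revbin.length % 8) % 8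
  let paddedrevbin := revbin ++ List.replicate padding '0'
  PySem.Str.join " " (pvChunkLoop paddedrevbin 0)

-- ===== PORT B =====
-- int.bit_length()
def pvBitLen (n : Nat) : Nat := if _h : n = 0 then 0 else pvBitLen (n / 2) + 1
decreasing_by omega

-- the inner loop: for b in range(8): rev = 2*rev + ((byte >> b) & 1)
def pvRev8 (byte : Nat) : Nat := (List.range 8).foldl (fun r b => 2 * r + ((byte >>> b) &&& 1)) 0

def get_octetstring_alt (portlist : Option (List Int)) : String :=
  let pl := portlist.getD []                                     -- (portlist or [])
  let portsum : Nat := pl.foldl (fun a i => a + (1 : Nat) <<< (i - 1).toNat) 0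
  let nbytes := max 1 ((pvBitLen portsum + 7) / 8)
  PySem.Str.join " " ((List.range nbytes).map (fun k => pvHex2 (pvRev8 ((portsum >>> (8 * k)) &&& 255))))

-- ===== PRECONDITION & SPEC =====
-- Pre_ excludes exactly the inputs where Python A raises: 1 << (i-1) is a ValueError for i ≤ 0.
def Pre_get_octetstring (portlist : Option (List Int)) : Prop :=
  ∀ i ∈ portlist.getD [], 1 ≤ i
instance (portlist : Option (List Int)) : Decidable (Pre_get_octetstring portlist) := by
  unfold Pre_get_octetstring; infer_instance
def pvWitness_get_octetstring : Option (List Int) := some [1, 5, 17]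

def Spec_get_octetstring (portlist : Option (List Int)) (out : String) : Prop := out = get_octetstring_alt portlist
instance (portlist : Option (List Int)) (out : String) : Decidable (Spec_get_octetstring portlist out) := by unfold Spec_get_octetstring; infer_instance

-- ===== CLAIM (what is proved, stated in full; the proofs are below) =====
def Claim_equal_get_octetstring : Prop := ∀ (portlist : Option (List Int)), Dom_get_octetstring portlist → Pre_get_octetstring portlist → Spec_get_octetstring portlist (get_octetstring portlist)

-- ===== LEMMAS AND PROOFS =====

-- reference view of A's reversed binary string: LSB-first digit list
def pvLsb (n : Nat) : List Char :=
  if _h : n = 0 then [] else (if n % 2 = 1 then '1' else '0') :: pvLsb (n / 2)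
decreasing_by omega

-- exactly k LSB-first digits of m
def pvBitsL : Nat → Nat → List Char
  | 0, _ => []
  | k + 1, m => (if m % 2 = 1 then '1' else '0') :: pvBitsL k (m / 2)

-- value of the k low bits of m read in reverse (bit 0 is most significant)
def pvRevVal : Nat → Nat → Nat
  | 0, _ => 0
  | k + 1, m => (m % 2) * 2 ^ k + pvRevVal k (m / 2)

theorem pvBinChars_append (n : Nat) : ∀ acc, pvBinChars n acc = pvBinChars n [] ++ acc := by
  induction n using Nat.strong_induction_on with
  | _ n ih =>
    intro acc
    by_cases h : n = 0
    · subst h; simp [pvBinChars]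
    · conv_lhs => rw [pvBinChars]
      conv_rhs => rw [pvBinChars]
      simp only [h, dite_false]
      rw [ih (n / 2) (by omega) ((if n % 2 = 1 then '1' else '0') :: acc),
          ih (n / 2) (by omega) [(if n % 2 = 1 then '1' else '0')]]
      simp

theorem pvBinChars_reverse (n : Nat) : (pvBinChars n []).reverse = pvLsb n := by
  induction n using Nat.strong_induction_on with
  | _ n ih =>
    rw [pvBinChars, pvLsb]
    by_cases h : n = 0
    · simp [h]
    · simp only [h, dite_false]
      rw [pvBinChars_append]
      simp [ih (n / 2) (by omega)]

theorem pvLsb_length (n : Nat) : (pvLsb n).length = pvBitLen n := by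
  induction n using Nat.strong_induction_on with
  | _ n ih =>
    rw [pvLsb, pvBitLen]
    by_cases h : n = 0
    · simp [h]
    · simp [h, ih (n / 2) (by omega)]

theorem pvBitsL_length : ∀ k m, (pvBitsL k m).length = k := by
  intro k
  induction k with
  | zero => intro m; rfl
  | succ k ih => intro m; simp [pvBitsL, ih]

theorem pvBitsL_zero : ∀ k, pvBitsL k 0 = List.replicate k '0' := by
  intro k
  induction k with
  | zero => rfl
  | succ k ih => simp [pvBitsL, ih, List.replicate_succ]

theorem pvLsb_split : ∀ k n, 2 ^ k ≤ n → pvLsb n = pvBitsL k n ++ pvLsb (n / 2 ^ k) := by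
  intro k
  induction k with
  | zero => intro n _; simp [pvBitsL]
  | succ k ih =>
    intro n hn
    have hpow : (2 : Nat) ^ (k + 1) = 2 * 2 ^ k := by rw [pow_succ]; ring
    have hp : 0 < (2 : Nat) ^ (k + 1) := Nat.two_pow_pos _
    have h0 : n ≠ 0 := by omega
    have h2 : (2 : Nat) ^ k ≤ n / 2 := by
      rw [Nat.le_div_iff_mul_le (by norm_num)]
      omega
    conv_lhs => rw [pvLsb]
    simp only [h0, dite_false]
    rw [ih (n / 2) h2]
    show _ :: (pvBitsL k (n / 2) ++ pvLsb (n / 2 / 2 ^ k))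
        = pvBitsL (k + 1) n ++ pvLsb (n / 2 ^ (k + 1))
    rw [Nat.div_div_eq_div_mul, show 2 * 2 ^ k = 2 ^ (k + 1) from hpow.symm]
    simp [pvBitsL]

theorem pvLsb_pad : ∀ k n, n < 2 ^ k →
    pvLsb n ++ List.replicate (k - (pvLsb n).length) '0' = pvBitsL k n := by
  intro k
  induction k with
  | zero =>
    intro n h
    have : n = 0 := by omega
    subst this
    simp [pvLsb, pvBitsL]
  | succ k ih =>
    intro n h
    have hpow : (2 : Nat) ^ (k + 1) = 2 * 2 ^ k := by rw [pow_succ]; ring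
    by_cases h0 : n = 0
    · subst h0
      rw [pvLsb]
      simp [pvBitsL_zero]
    · rw [pvLsb]
      simp only [h0, dite_false, List.length_cons]
      have hk : (k + 1) - ((pvLsb (n / 2)).length + 1) = k - (pvLsb (n / 2)).length := by omega
      rw [hk, List.cons_append, ih (n / 2) (by omega)]
      simp [pvBitsL]

theorem pvBitLen_le_iff : ∀ k n, pvBitLen n ≤ k ↔ n < 2 ^ k := by
  intro k
  induction k with
  | zero =>
    intro n
    rw [pvBitLen, pow_zero]
    by_cases h : n = 0
    · simp [h]
    · simp only [h, dite_false]
      omega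
  | succ k ih =>
    intro n
    have hpow : (2 : Nat) ^ (k + 1) = 2 * 2 ^ k := by rw [pow_succ]; ring
    have hp := Nat.two_pow_pos (k + 1)
    by_cases h : n = 0
    · subst h
      rw [pvBitLen]
      rw [dif_pos rfl]
      constructor
      · intro _; omega
      · intro _; omega
    · rw [pvBitLen]
      simp only [h, dite_false, Nat.add_le_add_iff_right]
      rw [ih (n / 2)]
      omega

theorem pvBitLen_split : ∀ k n, 2 ^ k ≤ n → pvBitLen n = pvBitLen (n / 2 ^ k) + k := by
  intro k
  induction k with
  | zero => intro n _; simp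
  | succ k ih =>
    intro n hn
    have hpow : (2 : Nat) ^ (k + 1) = 2 * 2 ^ k := by rw [pow_succ]; ring
    have hp : 0 < (2 : Nat) ^ (k + 1) := Nat.two_pow_pos _
    have h0 : n ≠ 0 := by omega
    have h2 : (2 : Nat) ^ k ≤ n / 2 := by
      rw [Nat.le_div_iff_mul_le (by norm_num)]
      omega
    rw [pvBitLen]
    simp only [h0, dite_false]
    rw [ih (n / 2) h2, Nat.div_div_eq_div_mul,
        show 2 * 2 ^ k = 2 ^ (k + 1) from hpow.symm]
    omega

theorem pvBinVal_bitsL : ∀ k m a,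
    (pvBitsL k m).foldl (fun a c => 2 * a + (if c = '1' then 1 else 0)) a
      = a * 2 ^ k + pvRevVal k m := by
  intro k
  induction k with
  | zero => intro m a; simp [pvBitsL, pvRevVal]
  | succ k ih =>
    intro m a
    simp only [pvBitsL, List.foldl_cons]
    rw [ih (m / 2)]
    have hd : (if (if m % 2 = 1 then '1' else '0') = '1' then 1 else 0 : Nat) = m % 2 := by
      rcases Nat.mod_two_eq_zero_or_one m with h | h <;> simp [h]
    rw [hd]
    show (2 * a + m % 2) * 2 ^ k + pvRevVal k (m / 2)
        = a * 2 ^ (k + 1) + (m % 2 * 2 ^ k + pvRevVal k (m / 2))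
    rw [pow_succ]
    ring

theorem pvRevVal_congr : ∀ k m n, m % 2 ^ k = n % 2 ^ k → pvRevVal k m = pvRevVal k n := by
  intro k
  induction k with
  | zero => intro m n _; rfl
  | succ k ih =>
    intro m n h
    rw [show (2 : Nat) ^ (k + 1) = 2 * 2 ^ k from by rw [pow_succ]; ring,
        Nat.mod_mul, Nat.mod_mul] at h
    have h1 : m % 2 = n % 2 := by omega
    have h2 : m / 2 % 2 ^ k = n / 2 % 2 ^ k := by omega
    simp only [pvRevVal]
    rw [h1, ih _ _ h2]

theorem pvRevFold (m : Nat) : ∀ n s r,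
    (List.range' s n).foldl (fun r b => 2 * r + ((m >>> b) &&& 1)) r
      = r * 2 ^ n + pvRevVal n (m >>> s) := by
  intro n
  induction n with
  | zero => intro s r; simp [pvRevVal]
  | succ n ih =>
    intro s r
    rw [List.range'_succ]
    simp only [List.foldl_cons]
    rw [ih (s + 1), Nat.and_one_is_mod]
    have hsh : m >>> (s + 1) = (m >>> s) / 2 := Nat.shiftRight_succ m s
    rw [hsh]
    show (2 * r + m >>> s % 2) * 2 ^ n + pvRevVal n (m >>> s / 2)
        = r * 2 ^ (n + 1) + (m >>> s % 2 * 2 ^ n + pvRevVal n (m >>> s / 2))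
    rw [pow_succ]
    ring

theorem pvRev8_eq (m : Nat) : pvRev8 m = pvRevVal 8 m := by
  rw [pvRev8, List.range_eq_range', pvRevFold]
  simp

theorem pvChunkLoop_drop : ∀ (fuel : Nat) (l : List Char) (i : Nat), l.length - i ≤ fuel →
    pvChunkLoop l i = pvChunkLoop (l.drop i) 0 := by
  intro fuel
  induction fuel with
  | zero =>
    intro l i h
    conv_lhs => rw [pvChunkLoop]
    conv_rhs => rw [pvChunkLoop]
    have c1 : ¬ i < l.length := by omega
    have c2 : ¬ 0 < (l.drop i).length := by rw [List.length_drop]; omega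
    simp [c1]
  | succ fuel ih =>
    intro l i h
    by_cases hc : i < l.length
    · conv_lhs => rw [pvChunkLoop]
      conv_rhs => rw [pvChunkLoop]
      have hc2 : 0 < (l.drop i).length := by rw [List.length_drop]; omega
      simp only [hc, hc2, if_true, List.drop_zero, Nat.zero_add]
      congr 1
      rw [ih l (i + 8) (by omega),
          ih (l.drop i) 8 (by rw [List.length_drop]; omega),
          List.drop_drop]
    · conv_lhs => rw [pvChunkLoop]
      conv_rhs => rw [pvChunkLoop]
      have c2 : ¬ 0 < (l.drop i).length := by rw [List.length_drop]; omega
      simp [hc]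

theorem pvChunkLoop_eq_drop (l : List Char) (i : Nat) :
    pvChunkLoop l i = pvChunkLoop (l.drop i) 0 :=
  pvChunkLoop_drop l.length l i (by omega)

theorem pvChunkLoop_cons (a b : List Char) (h : a.length = 8) :
    pvChunkLoop (a ++ b) 0 = pvHex2 (pvBinVal a) :: pvChunkLoop b 0 := by
  have h1 : (a ++ b).take 8 = a := by rw [← h]; exact List.take_left
  have h2 : (a ++ b).drop 8 = b := by rw [← h]; exact List.drop_left
  conv_lhs => rw [pvChunkLoop]
  have hlen : 0 < (a ++ b).length := by rw [List.length_append]; omega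
  rw [if_pos hlen]
  simp only [List.drop_zero, Nat.zero_add]
  rw [h1, pvChunkLoop_eq_drop, h2]

theorem pvChunkLoop_exact8 (l : List Char) (h : l.length = 8) :
    pvChunkLoop l 0 = [pvHex2 (pvBinVal l)] := by
  conv_lhs => rw [pvChunkLoop]
  rw [if_pos (by omega)]
  simp only [List.drop_zero, Nat.zero_add]
  rw [List.take_of_length_le (by omega)]
  conv_lhs => rw [pvChunkLoop]
  rw [if_neg (by omega)]

theorem pvMain : ∀ s : Nat,
    pvChunkLoop ((pvBin s).reverse ++ List.replicate ((8 - (pvBin s).reverse.length % 8) % 8) '0') 0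
      = (List.range (max 1 ((pvBitLen s + 7) / 8))).map
          (fun k => pvHex2 (pvRev8 ((s >>> (8 * k)) &&& 255))) := by
  intro s
  induction s using Nat.strong_induction_on with
  | _ s ih =>
  have h28 : (2 : Nat) ^ 8 = 256 := by norm_num
  have h255 : (255 : Nat) = 2 ^ 8 - 1 := by norm_num
  by_cases hs : s < 256
  · -- single byte
    have hpad : (pvBin s).reverse ++ List.replicate ((8 - (pvBin s).reverse.length % 8) % 8) '0'
        = pvBitsL 8 s := by
      by_cases h0 : s = 0
      · subst h0
        rw [pvBin, if_pos rfl, pvBitsL_zero]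
        decide
      · rw [pvBin, if_neg h0, pvBinChars_reverse]
        have hl1 : 1 ≤ (pvLsb s).length := by
          rw [pvLsb_length]
          have hx := pvBitLen_le_iff 0 s
          rw [pow_zero] at hx
          omega
        have hl8 : (pvLsb s).length ≤ 8 := by
          rw [pvLsb_length]
          exact (pvBitLen_le_iff 8 s).mpr (by omega)
        have hp : (8 - (pvLsb s).length % 8) % 8 = 8 - (pvLsb s).length := by omega
        rw [hp, pvLsb_pad 8 s (by omega)]
    rw [hpad, pvChunkLoop_exact8 _ (pvBitsL_length 8 s)]
    have hnb : max 1 ((pvBitLen s + 7) / 8) = 1 := by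
      have := (pvBitLen_le_iff 8 s).mpr (by omega)
      omega
    rw [hnb]
    simp only [List.range_one, List.map_cons, List.map_nil, Nat.mul_zero, Nat.shiftRight_zero]
    rw [h255, Nat.and_two_pow_sub_one_eq_mod, h28]
    rw [pvBinVal, pvBinVal_bitsL, pvRev8_eq]
    rw [Nat.zero_mul, Nat.zero_add,
        pvRevVal_congr 8 s (s % 256) (by rw [h28]; omega)]
  · -- more than one byte
    have hs' : 256 ≤ s := by omega
    have h0 : s ≠ 0 := by omega
    have hq1 : 1 ≤ s / 256 := (Nat.one_le_div_iff (by norm_num)).mpr hs'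
    rw [pvBin, if_neg h0, pvBinChars_reverse, pvLsb_split 8 s (by rw [h28]; omega), h28]
    have hlen8 : (pvBitsL 8 s).length = 8 := pvBitsL_length 8 s
    have hpadeq : (8 - (pvBitsL 8 s ++ pvLsb (s / 256)).length % 8) % 8
        = (8 - (pvLsb (s / 256)).length % 8) % 8 := by
      rw [List.length_append, hlen8]
      omega
    rw [hpadeq, List.append_assoc, pvChunkLoop_cons _ _ hlen8]
    have hREV : (pvBin (s / 256)).reverse = pvLsb (s / 256) := by
      rw [pvBin, if_neg (by omega), pvBinChars_reverse]
    have hIH := ih (s / 256) (Nat.div_lt_self (by omega) (by norm_num))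
    rw [hREV] at hIH
    rw [hIH]
    have hbl : pvBitLen s = pvBitLen (s / 256) + 8 := by
      have := pvBitLen_split 8 s (by rw [h28]; omega)
      rwa [h28] at this
    have hbl1 : 1 ≤ pvBitLen (s / 256) := by
      have hx := pvBitLen_le_iff 0 (s / 256)
      rw [pow_zero] at hx
      omega
    have hnb : max 1 ((pvBitLen s + 7) / 8) = (max 1 ((pvBitLen (s / 256) + 7) / 8)) + 1 := by
      rw [hbl]
      omega
    rw [hnb, List.range_succ_eq_map, List.map_cons, List.map_map]
    congr 1
    · -- head byte
      rw [pvBinVal, pvBinVal_bitsL]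
      simp only [Nat.mul_zero, Nat.shiftRight_zero]
      rw [h255, Nat.and_two_pow_sub_one_eq_mod, h28, pvRev8_eq]
      rw [Nat.zero_mul, Nat.zero_add,
          pvRevVal_congr 8 s (s % 256) (by rw [h28]; omega)]
    · -- remaining bytes
      apply List.map_congr_left
      intro k _
      simp only [Function.comp_apply]
      have hsh : s >>> (8 * (k + 1)) = (s / 256) >>> (8 * k) := by
        rw [Nat.shiftRight_eq_div_pow, Nat.shiftRight_eq_div_pow, Nat.div_div_eq_div_mul]
        congr 1
        rw [Nat.mul_succ, pow_add, h28]
        ring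
      rw [hsh]

theorem pvFold_sum : ∀ (l : List Int) (a : Nat),
    l.foldl (fun a i => a + (1 : Nat) <<< (i - 1).toNat) a
      = a + (l.map (fun i => (1 : Nat) <<< (i - 1).toNat)).sum := by
  intro l
  induction l with
  | nil => intro a; simp
  | cons x l ih =>
    intro a
    simp only [List.foldl_cons, List.map_cons, List.sum_cons]
    rw [ih]
    omega

-- ===== VERDICT (by name: the statement is the Claim_ definition above) =====
theorem get_octetstring_spec : Claim_equal_get_octetstring := by
  intro portlist _ _
  unfold Spec_get_octetstring get_octetstring get_octetstring_alt
  simp only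
  rw [pvFold_sum, Nat.zero_add, pvMain]
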